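-- pv_equiv track=rewrite | github.com/sh95fit/CodingTest | 백준/Silver/1417. 국회의원 선거/국회의원 선거.py | find_min_bribes
-- ===== SOURCE A (Python) =====
-- def find_min_bribes(N, votes):
--     dasom_votes = votes[0]
--     other_votes = votes[1:]
--     bribes = 0
--
--     while other_votes and dasom_votes <= max(other_votes):
--         max_votes = max(other_votes)
--         max_index = other_votes.index(max_votes)
--         other_votes[max_index] -= 1
--         dasom_votes += 1
--         bribes += 1
--
--     return bribes
-- ===== SOURCE B (Python) =====
-- def find_min_bribes(N, votes):
--     # Binary search for the least number of bribes b such that, with dasom at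
--     # votes[0] + b, the total excess of the other candidates over dasom - 1 is at most b.
--     dasom = votes[0]
--     others = votes[1:]
--     hi = sum(v - (dasom - 1) for v in others if v > dasom - 1)
--     lo = 0
--     while lo < hi:
--         mid = (lo + hi) // 2
--         need = sum(v - (dasom + mid - 1) for v in others if v > dasom + mid - 1)
--         if need <= mid:
--             hi = mid
--         else:
--             lo = mid + 1
--     return lo
-- ===== Notes on version B (the rewrite author's own statement) =====
-- stated objective: faster
-- what changed: Replaced A's one-bribe-at-a-time simulation (rescanning the list for the max each iteration) by a binary search on the number of bribes b, checking feasibility as 'total excess of the others over dasom+b-1 is at most b'.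
import Mathlib
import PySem

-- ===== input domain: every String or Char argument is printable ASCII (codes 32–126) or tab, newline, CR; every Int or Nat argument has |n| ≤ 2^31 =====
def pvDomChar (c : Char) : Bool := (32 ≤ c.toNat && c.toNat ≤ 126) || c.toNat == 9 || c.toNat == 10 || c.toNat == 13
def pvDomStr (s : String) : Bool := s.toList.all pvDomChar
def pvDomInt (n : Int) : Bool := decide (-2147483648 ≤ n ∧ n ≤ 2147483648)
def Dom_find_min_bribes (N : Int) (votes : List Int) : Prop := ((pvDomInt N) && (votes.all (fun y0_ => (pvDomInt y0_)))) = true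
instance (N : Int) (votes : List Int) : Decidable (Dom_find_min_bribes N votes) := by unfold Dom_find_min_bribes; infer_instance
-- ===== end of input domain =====

-- B replaces A's one-vote-at-a-time greedy simulation by a binary search on the
-- number of bribes b, testing feasibility via the total excess over dasom+b-1
-- (objective: faster — O(n log V) instead of O(bribes·n)).

-- ===== PORT A =====

-- other_votes[other_votes.index(max_votes)] -= 1  (the element there equals max_votes)
def pvDecFirstMax (xs : List Int) (m : Int) : List Int :=
  match PySem.List.index? xs m with
  | some i => xs.set i (m - 1)
  | none => xs   -- unreachable: m = max(xs) is in xs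

-- termination measure for A's while loop: max(d-1, max xs) + 1 - d
def pvMeasureA (d : Int) (xs : List Int) : Nat :=
  (xs.foldl max (d - 1) + 1 - d).toNat

theorem pvMeasureA_dec (d : Int) (xs : List Int) (m : Int)
    (h : PySem.List.max? xs (fun y => y) = some m) (hd : d ≤ m) :
    pvMeasureA (d + 1) (pvDecFirstMax xs m) < pvMeasureA d xs := by
  have hmem := PySem.List.max?_mem h
  have hmax := PySem.List.max?_isMax h
  -- old foldl = m (since d-1 < m and all elements ≤ m)
  have h1 : xs.foldl max (d - 1) = m := by
    have hle : xs.foldl max (d - 1) ≤ max (d - 1) m := by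
      rcases PySem.List.foldl_max_mem xs (d - 1) with h' | h'
      · omega
      · have := hmax _ h'; omega
    have hge : m ≤ xs.foldl max (d - 1) := (PySem.List.le_foldl_max xs (d - 1)).2 m hmem
    omega
  -- new foldl ≤ m
  have h2 : (pvDecFirstMax xs m).foldl max d ≤ m := by
    rcases PySem.List.foldl_max_mem (pvDecFirstMax xs m) d with h' | h'
    · omega
    · have hmem' : ∀ y ∈ pvDecFirstMax xs m, y ≤ m := by
        intro y hy
        unfold pvDecFirstMax at hy
        cases hidx : PySem.List.index? xs m with
        | none => rw [hidx] at hy; exact hmax _ hy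
        | some i =>
          rw [hidx] at hy
          rcases List.mem_or_eq_of_mem_set hy with h'' | h''
          · exact hmax _ h''
          · omega
      have := hmem' _ h'; omega
  unfold pvMeasureA
  have hdd : d + 1 - 1 = d := by omega
  rw [hdd]
  omega

-- the while loop of A, carrying (dasom_votes, other_votes, bribes)
def pvLoopA (d : Int) (xs : List Int) (bribes : Int) : Int :=
  match h : PySem.List.max? xs (fun y => y) with
  | none => bribes                       -- other_votes is empty: loop exits
  | some m =>
    if hd : d ≤ m then
      pvLoopA (d + 1) (pvDecFirstMax xs m) (bribes + 1)
    else bribes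
termination_by pvMeasureA d xs
decreasing_by exact pvMeasureA_dec d xs m h hd

def find_min_bribes (N : Int) (votes : List Int) : Int :=
  match votes with
  | [] => 0                              -- votes[0] raises IndexError; excluded by Pre_
  | d :: rest => pvLoopA d (PySem.List.slice (d :: rest) (some 1) none) 0

-- ===== PORT B =====

-- sum(v - t for v in others if v > t)
def pvExcess (others : List Int) (t : Int) : Int :=
  ((others.filter (fun v => decide (t < v))).map (fun v => v - t)).sum

def pvBSearch (dasom : Int) (others : List Int) (lo hi : Int) : Int :=
  if hlt : lo < hi then
    let mid := PySem.Int.floordiv (lo + hi) 2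
    if pvExcess others (dasom + mid - 1) ≤ mid then
      pvBSearch dasom others lo mid
    else
      pvBSearch dasom others (mid + 1) hi
  else lo
termination_by (hi - lo).toNat
decreasing_by
  · have h2 : PySem.Int.floordiv (lo + hi) 2 < hi :=
      (PySem.Int.floordiv_lt_iff_lt_mul (by omega)).2 (by omega)
    omega
  · have h1 := PySem.Int.floordiv_two_mid_bounds (le_of_lt hlt)
    omega

def find_min_bribes_alt (N : Int) (votes : List Int) : Int :=
  match votes with
  | [] => 0                              -- votes[0] raises IndexError; excluded by Pre_
  | d :: rest =>
    let others := PySem.List.slice (d :: rest) (some 1) none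
    pvBSearch d others 0 (pvExcess others (d - 1))

-- ===== PRECONDITION & SPEC =====
-- A evaluates votes[0], which raises IndexError on the empty list; nothing else raises.
def Pre_find_min_bribes (N : Int) (votes : List Int) : Prop := votes ≠ []
instance (N : Int) (votes : List Int) : Decidable (Pre_find_min_bribes N votes) := by
  unfold Pre_find_min_bribes; infer_instance

def pvWitness_find_min_bribes : Int × List Int := (3, [5, 7, 7])

def Spec_find_min_bribes (N : Int) (votes : List Int) (out : Int) : Prop := out = find_min_bribes_alt N votes
instance (N : Int) (votes : List Int) (out : Int) : Decidable (Spec_find_min_bribes N votes out) := by unfold Spec_find_min_bribes; infer_instance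

-- ===== CLAIM (what is proved, stated in full; the proofs are below) =====
def Claim_equal_find_min_bribes : Prop := ∀ (N : Int) (votes : List Int), Dom_find_min_bribes N votes → Pre_find_min_bribes N votes → Spec_find_min_bribes N votes (find_min_bribes N votes)

-- ===== LEMMAS AND PROOFS =====

-- pvExcess as a sum of clamped terms, convenient for pointwise reasoning
def pvF (xs : List Int) (t : Int) : Int :=
  (xs.map (fun v => max (v - t) 0)).sum

theorem pvExcess_eq_pvF (xs : List Int) (t : Int) : pvExcess xs t = pvF xs t := by
  induction xs with
  | nil => rfl
  | cons x xs ih =>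
    unfold pvExcess pvF at *
    by_cases h : t < x <;> simp [h] <;> omega

theorem pvF_nonneg (xs : List Int) (t : Int) : 0 ≤ pvF xs t := by
  induction xs with
  | nil => simp [pvF]
  | cons x xs ih => unfold pvF at *; simp at *; omega

theorem pvF_zero (xs : List Int) (t : Int) (h : ∀ v ∈ xs, v ≤ t) : pvF xs t = 0 := by
  induction xs with
  | nil => rfl
  | cons x xs ih =>
    unfold pvF at *
    simp at *
    rw [ih h.2]
    omega

theorem pvF_anti (xs : List Int) {t t' : Int} (h : t ≤ t') : pvF xs t' ≤ pvF xs t := by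
  induction xs with
  | nil => simp [pvF]
  | cons x xs ih => unfold pvF at *; simp at *; omega

theorem pvF_single_le (xs : List Int) (t m : Int) (h : m ∈ xs) : max (m - t) 0 ≤ pvF xs t := by
  induction xs with
  | nil => simp at h
  | cons x xs ih =>
    unfold pvF at *
    rcases List.mem_cons.1 h with h' | h'
    · subst h'
      have := pvF_nonneg xs t
      unfold pvF at this
      simp
      omega
    · have := ih h'
      simp at *
      omega

theorem pvF_append (a b : List Int) (t : Int) : pvF (a ++ b) t = pvF a t + pvF b t := by
  unfold pvF; simp

-- decrementing the first occurrence of the maximum lowers the excess by exactly 1 below the max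
theorem pvF_dec (xs : List Int) (m t : Int)
    (hidx : PySem.List.index? xs m ≠ none) (ht : t < m) :
    pvF (pvDecFirstMax xs m) t = pvF xs t - 1 := by
  cases h : PySem.List.index? xs m with
  | none => exact absurd h hidx
  | some i =>
    rcases (PySem.List.index?_eq_some_iff xs m i).1 h with ⟨pre, suf, hxs, hlen, _⟩
    subst hxs
    subst hlen
    unfold pvDecFirstMax
    rw [h]
    show pvF ((pre ++ m :: suf).set pre.length (m - 1)) t = pvF (pre ++ m :: suf) t - 1
    have hset : (pre ++ m :: suf).set pre.length (m - 1) = pre ++ (m - 1) :: suf := by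
      rw [List.set_append_right _ _ (le_refl _)]
      simp
    rw [hset, pvF_append, pvF_append]
    unfold pvF
    simp
    omega

-- unfolding equations for A's loop
theorem pvLoopA_none (d : Int) (xs : List Int) (bribes : Int)
    (h : PySem.List.max? xs (fun y => y) = none) : pvLoopA d xs bribes = bribes := by
  rw [pvLoopA]
  split
  · rfl
  · rename_i m hm; rw [h] at hm; cases hm

theorem pvLoopA_stop (d : Int) (xs : List Int) (bribes : Int) (m : Int)
    (h : PySem.List.max? xs (fun y => y) = some m) (hd : ¬ d ≤ m) :
    pvLoopA d xs bribes = bribes := by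
  rw [pvLoopA]
  split
  · rfl
  · rename_i m' hm
    rw [h] at hm
    cases hm
    rw [dif_neg hd]

theorem pvLoopA_step (d : Int) (xs : List Int) (bribes : Int) (m : Int)
    (h : PySem.List.max? xs (fun y => y) = some m) (hd : d ≤ m) :
    pvLoopA d xs bribes = pvLoopA (d + 1) (pvDecFirstMax xs m) (bribes + 1) := by
  rw [pvLoopA]
  split
  · rename_i hm; rw [h] at hm; cases hm
  · rename_i m' hm
    rw [h] at hm
    cases hm
    rw [dif_pos hd]

-- feasibility of b bribes from state (d, xs): total excess over d+b-1 is at most b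
def pvFeas (d : Int) (xs : List Int) (b : Int) : Prop := pvF xs (d + b - 1) ≤ b

theorem pvFeas_mono (d : Int) (xs : List Int) {b b' : Int} (h : pvFeas d xs b) (hle : b ≤ b') :
    pvFeas d xs b' := by
  unfold pvFeas at *
  have := pvF_anti xs (t := d + b - 1) (t' := d + b' - 1) (by omega)
  omega

-- A's loop computes (bribes +) the least feasible b
theorem pvLoopA_least (d : Int) (xs : List Int) (bribes : Int) :
    pvFeas d xs (pvLoopA d xs bribes - bribes) ∧
    ∀ b, pvFeas d xs b → pvLoopA d xs bribes - bribes ≤ b := by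
  induction d, xs, bribes using pvLoopA.induct with
  | case1 d xs bribes h =>
    rw [pvLoopA_none d xs bribes h]
    have hnil : xs = [] := (PySem.List.max?_eq_none_iff xs _).1 h
    subst hnil
    constructor
    · simp [pvFeas, pvF]
    · intro b hb
      have := pvF_nonneg ([] : List Int) (d + b - 1)
      unfold pvFeas at hb
      omega
  | case2 d xs bribes m h hd ih =>
    rw [pvLoopA_step d xs bribes m h hd]
    have hmem := PySem.List.max?_mem h
    have hmax := PySem.List.max?_isMax h
    simp only at hmax
    have hidx : PySem.List.index? xs m ≠ none := fun hn =>
      ((PySem.List.index?_eq_none_iff xs m).1 hn) hmem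
    set r' := pvLoopA (d + 1) (pvDecFirstMax xs m) (bribes + 1) - (bribes + 1) with hr'
    have hrw : pvLoopA (d + 1) (pvDecFirstMax xs m) (bribes + 1) - bribes = r' + 1 := by omega
    rw [hrw]
    obtain ⟨ihf, ihmin⟩ := ih
    constructor
    · -- feasibility of r' + 1 for (d, xs)
      unfold pvFeas at *
      have harith : d + (r' + 1) - 1 = d + r' := by omega
      rw [harith]
      by_cases hc : d + r' < m
      · have := pvF_dec xs m (d + r') hidx hc
        have harith2 : d + 1 + r' - 1 = d + r' := by omega
        rw [harith2] at ihf
        omega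
      · have h0 : pvF xs (d + r') = 0 :=
          pvF_zero xs _ (fun v hv => by have := hmax v hv; omega)
        have hr'0 : 0 ≤ r' := by
          have := pvF_nonneg (pvDecFirstMax xs m) (d + 1 + r' - 1)
          omega
        omega
    · -- minimality
      intro b hb
      have hb' := hb
      unfold pvFeas at hb'
      -- b ≥ 1: the excess at threshold d+b-1 contains m - (d+b-1) ≥ 1 when b ≤ 0
      have hb1 : 1 ≤ b := by
        by_contra hb0
        have hb0' : b ≤ 0 := by omega
        have h1 : max (m - (d + b - 1)) 0 ≤ pvF xs (d + b - 1) := pvF_single_le xs _ m hmem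
        have h2 : 1 ≤ max (m - (d + b - 1)) 0 := by omega
        omega
      -- b - 1 is feasible for (d+1, xs')
      have hfeas' : pvFeas (d + 1) (pvDecFirstMax xs m) (b - 1) := by
        unfold pvFeas
        have harith : d + 1 + (b - 1) - 1 = d + b - 1 := by omega
        rw [harith]
        by_cases hc : d + b - 1 < m
        · have hd1 := pvF_dec xs m (d + b - 1) hidx hc
          omega
        · have h1 : ∀ v ∈ pvDecFirstMax xs m, v ≤ d + b - 1 := by
            intro v hv
            unfold pvDecFirstMax at hv
            cases hi : PySem.List.index? xs m with
            | none => exact absurd hi hidx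
            | some i =>
              rw [hi] at hv
              rcases List.mem_or_eq_of_mem_set hv with h'' | h''
              · have := hmax v h''; omega
              · omega
          rw [pvF_zero _ _ h1]
          omega
      have := ihmin _ hfeas'
      omega
  | case3 d xs bribes m h hd =>
    rw [pvLoopA_stop d xs bribes m h hd]
    have hmax := PySem.List.max?_isMax h
    simp only at hmax
    constructor
    · unfold pvFeas
      simp only [sub_self]
      rw [pvF_zero xs _ (fun v hv => by have := hmax v hv; omega)]
    · intro b hb
      unfold pvFeas at hb
      have := pvF_nonneg xs (d + b - 1)
      omega

-- unfolding equations for B's binary search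
theorem pvBSearch_stop (dasom : Int) (others : List Int) (lo hi : Int) (h : ¬ lo < hi) :
    pvBSearch dasom others lo hi = lo := by
  rw [pvBSearch]
  rw [dif_neg h]

theorem pvBSearch_left (dasom : Int) (others : List Int) (lo hi : Int) (hlt : lo < hi)
    (hf : pvExcess others (dasom + PySem.Int.floordiv (lo + hi) 2 - 1) ≤ PySem.Int.floordiv (lo + hi) 2) :
    pvBSearch dasom others lo hi = pvBSearch dasom others lo (PySem.Int.floordiv (lo + hi) 2) := by
  rw [pvBSearch]
  rw [dif_pos hlt]
  exact if_pos hf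

theorem pvBSearch_right (dasom : Int) (others : List Int) (lo hi : Int) (hlt : lo < hi)
    (hf : ¬ pvExcess others (dasom + PySem.Int.floordiv (lo + hi) 2 - 1) ≤ PySem.Int.floordiv (lo + hi) 2) :
    pvBSearch dasom others lo hi = pvBSearch dasom others (PySem.Int.floordiv (lo + hi) 2 + 1) hi := by
  rw [pvBSearch]
  rw [dif_pos hlt]
  exact if_neg hf

-- B's binary search returns the least feasible b
theorem pvBSearch_least (d : Int) (others : List Int) :
    ∀ lo hi, lo ≤ hi → pvFeas d others hi → (∀ b, pvFeas d others b → lo ≤ b) →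
    pvFeas d others (pvBSearch d others lo hi) ∧
    ∀ b, pvFeas d others b → pvBSearch d others lo hi ≤ b := by
  intro lo hi
  induction lo, hi using pvBSearch.induct (dasom := d) (others := others) with
  | case1 lo hi hlt mid hfm ih =>
    intro _ hhi hlb
    have hmid := PySem.Int.floordiv_two_mid_bounds (le_of_lt hlt)
    rw [pvBSearch_left d others lo hi hlt hfm]
    refine ih (by omega) ?_ hlb
    unfold pvFeas
    rw [← pvExcess_eq_pvF]
    exact hfm
  | case2 lo hi hlt mid hfm ih =>
    intro _ hhi hlb
    have hmid := PySem.Int.floordiv_two_mid_bounds (le_of_lt hlt)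
    have hmeq : mid = PySem.Int.floordiv (lo + hi) 2 := rfl
    rw [hmeq] at hfm
    rw [pvBSearch_right d others lo hi hlt hfm]
    have hmlt : PySem.Int.floordiv (lo + hi) 2 < hi :=
      (PySem.Int.floordiv_lt_iff_lt_mul (by omega)).2 (by omega)
    refine ih (by omega) hhi ?_
    intro b hb
    by_contra hc
    have hble : b ≤ PySem.Int.floordiv (lo + hi) 2 := by omega
    have : pvFeas d others (PySem.Int.floordiv (lo + hi) 2) := pvFeas_mono d others hb hble
    unfold pvFeas at this
    rw [← pvExcess_eq_pvF] at this
    exact hfm this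
  | case3 lo hi hlt =>
    intro hle hhi hlb
    rw [pvBSearch_stop d others lo hi hlt]
    have : lo = hi := by omega
    subst this
    exact ⟨hhi, hlb⟩

-- ===== VERDICT (by name: the statement is the Claim_ definition above) =====
theorem find_min_bribes_spec : Claim_equal_find_min_bribes := by
  intro N votes _ hpre
  unfold Spec_find_min_bribes
  match votes with
  | [] => exact absurd rfl hpre
  | d :: rest =>
    show pvLoopA d (PySem.List.slice (d :: rest) (some 1) none) 0
        = pvBSearch d (PySem.List.slice (d :: rest) (some 1) none) 0
            (pvExcess (PySem.List.slice (d :: rest) (some 1) none) (d - 1))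
    set others := PySem.List.slice (d :: rest) (some 1) none with hoth
    have hA := pvLoopA_least d others 0
    simp only [sub_zero] at hA
    have hhi0 : 0 ≤ pvExcess others (d - 1) := by
      rw [pvExcess_eq_pvF]; exact pvF_nonneg _ _
    have hhif : pvFeas d others (pvExcess others (d - 1)) := by
      unfold pvFeas
      have := pvF_anti others (t := d - 1) (t' := d + pvExcess others (d - 1) - 1) (by omega)
      rw [pvExcess_eq_pvF] at *
      omega
    have hlb : ∀ b, pvFeas d others b → (0 : Int) ≤ b := by
      intro b hb
      unfold pvFeas at hb
      have := pvF_nonneg others (d + b - 1)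
      omega
    have hB := pvBSearch_least d others 0 (pvExcess others (d - 1)) hhi0 hhif hlb
    have h1 := hA.2 _ hB.1
    have h2 := hB.2 _ hA.1
    omega
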